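-- pv_equiv track=rewrite | github.com/TomasPereiraa/Pokemon-Card-Tracking | visualizer.py | expand_history_with_duplicates
-- ===== SOURCE A (Python) =====
-- def get_quantity(entry):
--     try:
--         return int(entry.get("quantity", 1))
--     except Exception:
--         return 1
--
-- def get_latest_entry(card_data):
--     if not card_data:
--         return {}
--
--     sorted_data = sorted(card_data, key=lambda entry: entry.get("date", ""))
--     return sorted_data[-1]
--
-- def get_latest_quantity(card_data):
--     latest_entry = get_latest_entry(card_data)
--     return get_quantity(latest_entry)
--
-- def expand_history_with_duplicates(history):
--     expanded = {}
--
--     for card_key, card_data in history.items():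
--         quantity = get_latest_quantity(card_data)
--
--         expanded[card_key] = card_data
--
--         for copy_number in range(2, quantity + 1):
--             expanded[f"{card_key} (x{copy_number})"] = card_data
--
--     return expanded
-- ===== SOURCE B (Python) =====
-- def expand_history_with_duplicates(history):
--     pairs = []
--     for card_key, card_data in history.items():
--         best = None
--         best_date = ""
--         for entry in card_data:
--             d = entry.get("date", "")
--             if best is None or d >= best_date:
--                 best, best_date = entry, d
--         if best is None:
--             quantity = 1
--         else:
--             q = best.get("quantity")
--             if q is None:
--                 quantity = 1
--             else:
--                 try:
--                     quantity = int(q)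
--                 except ValueError:
--                     quantity = 1
--         pairs.append((card_key, card_data))
--         for i in range(2, quantity + 1):
--             pairs.append((f"{card_key} (x{i})", card_data))
--     return dict(pairs)
-- ===== Notes on version B (the rewrite author's own statement) =====
-- stated objective: alternative
-- what changed: Replaces the per-card sort-then-take-last (get_latest_entry/get_latest_quantity helpers) with a single linear scan keeping the last entry of maximal date, and builds the result as one flat pair list turned into a dict at the end instead of nested in-place dict insertions.
import Mathlib
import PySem

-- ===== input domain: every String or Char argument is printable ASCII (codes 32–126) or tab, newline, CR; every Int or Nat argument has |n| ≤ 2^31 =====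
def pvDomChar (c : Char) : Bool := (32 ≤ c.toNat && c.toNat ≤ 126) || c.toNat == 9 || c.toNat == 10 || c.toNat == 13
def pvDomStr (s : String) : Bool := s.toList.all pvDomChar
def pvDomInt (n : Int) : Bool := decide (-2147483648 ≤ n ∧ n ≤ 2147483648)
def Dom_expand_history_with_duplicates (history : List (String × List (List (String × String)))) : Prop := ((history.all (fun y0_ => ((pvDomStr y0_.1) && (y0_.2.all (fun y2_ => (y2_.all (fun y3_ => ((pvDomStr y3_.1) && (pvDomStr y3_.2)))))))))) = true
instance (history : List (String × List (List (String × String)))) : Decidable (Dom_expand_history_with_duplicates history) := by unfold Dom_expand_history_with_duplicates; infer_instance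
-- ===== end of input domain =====

-- B replaces the per-card sort-then-take-last with a single linear scan for the last
-- entry of maximal date, and builds the result dict from one flat pair list (alternative decomposition).


-- ===== PORT A =====
def get_quantity (entry : List (String × String)) : Int :=
  match (PySem.Dict.ofList entry).get? "quantity" with
  | none => 1                     -- entry.get("quantity", 1) defaults to the int 1
  | some s =>
    match PySem.Int.ofStr? s with  -- int(...) ; exception → 1
    | none => 1
    | some n => n

def get_latest_entry (card_data : List (List (String × String))) : List (String × String) :=
  if card_data = [] then []
  else
    PySem.List.pyGetD
      (PySem.List.sorted card_data (fun e => (PySem.Dict.ofList e).getD "date" "") false)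
      (-1) []

def get_latest_quantity (card_data : List (List (String × String))) : Int :=
  get_quantity (get_latest_entry card_data)

def expand_history_with_duplicates (history : List (String × List (List (String × String)))) : List (String × List (List (String × String))) :=
  (((PySem.Dict.ofList history).items).foldl
    (fun (expanded : PySem.Dict String (List (List (String × String)))) kv =>
      let quantity := get_latest_quantity kv.2
      let expanded := expanded.insert kv.1 kv.2
      (PySem.List.pyRange 2 (quantity + 1) 1).foldl
        (fun acc i => acc.insert (kv.1 ++ " (x" ++ PySem.Int.toStr i ++ ")") kv.2) expanded)
    PySem.Dict.empty).items

-- ===== PORT B =====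
-- linear scan: the last entry whose date is maximal (ties → last occurrence), paired with its date
def pvScanBest (card_data : List (List (String × String))) : Option (List (String × String) × String) :=
  card_data.foldl
    (fun best e =>
      let d := (PySem.Dict.ofList e).getD "date" ""
      match best with
      | none => some (e, d)
      | some (_, bd) => if bd ≤ d then some (e, d) else best)
    none

def pvQtyOfBest (best : Option (List (String × String) × String)) : Int :=
  match best with
  | none => 1
  | some (b, _) =>
    match (PySem.Dict.ofList b).get? "quantity" with
    | none => 1
    | some q =>
      match PySem.Int.ofStr? q with
      | none => 1
      | some n => n

def expand_history_with_duplicates_alt (history : List (String × List (List (String × String)))) : List (String × List (List (String × String))) :=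
  (PySem.Dict.ofList
    (((PySem.Dict.ofList history).items).foldl
      (fun (pairs : List (String × List (List (String × String)))) kv =>
        let quantity := pvQtyOfBest (pvScanBest kv.2)
        (pairs ++ [(kv.1, kv.2)]) ++
          (PySem.List.pyRange 2 (quantity + 1) 1).map
            (fun i => (kv.1 ++ " (x" ++ PySem.Int.toStr i ++ ")", kv.2)))
      [])).items

-- ===== PRECONDITION & SPEC =====
def Spec_expand_history_with_duplicates (history : List (String × List (List (String × String)))) (out : List (String × List (List (String × String)))) : Prop := out = expand_history_with_duplicates_alt history
instance (history : List (String × List (List (String × String)))) (out : List (String × List (List (String × String)))) : Decidable (Spec_expand_history_with_duplicates history out) := by unfold Spec_expand_history_with_duplicates; infer_instance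

-- ===== CLAIM (what is proved, stated in full; the proofs are below) =====
def Claim_equal_expand_history_with_duplicates : Prop := ∀ (history : List (String × List (List (String × String)))), Dom_expand_history_with_duplicates history → Spec_expand_history_with_duplicates history (expand_history_with_duplicates history)

-- ===== LEMMAS AND PROOFS =====

-- named copy of B's scan step (proof convenience only)
def pvScanStep (best : Option (List (String × String) × String)) (e : List (String × String)) :
    Option (List (String × String) × String) :=
  let d := (PySem.Dict.ofList e).getD "date" ""
  match best with
  | none => some (e, d)
  | some (_, bd) => if bd ≤ d then some (e, d) else best

lemma pvScanBest_eq_foldl (xs : List (List (String × String))) :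
    pvScanBest xs = xs.foldl pvScanStep none := rfl

-- insertBy never produces []
lemma insertBy_ne_nil {α : Type} (p : α → α → Bool) (x : α) (zs : List α) :
    PySem.List.insertBy p x zs ≠ [] := by
  cases zs with
  | nil => simp [PySem.List.insertBy]
  | cons z zs' =>
    simp only [PySem.List.insertBy]
    split <;> simp

lemma insertBy_cons (p : List (String × String) → List (String × String) → Bool)
    (x z : List (String × String)) (zs : List (List (String × String))) :
    PySem.List.insertBy p x (z :: zs)
      = if p x z = true then x :: z :: zs else z :: PySem.List.insertBy p x zs := rfl

-- inserting an element that compares 'before' the last keeps the last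
lemma getLast?_insertBy_of_before (p : List (String × String) → List (String × String) → Bool)
    (x m : List (String × String)) :
    ∀ zs : List (List (String × String)), zs.getLast? = some m → p x m = true →
      (PySem.List.insertBy p x zs).getLast? = some m := by
  intro zs
  induction zs with
  | nil => intro h; simp at h
  | cons z zs' ih =>
    intro hlast hp
    cases zs' with
    | nil =>
      simp at hlast
      subst hlast
      rw [insertBy_cons, hp]
      simp
    | cons w rest =>
      rw [List.getLast?_cons_cons] at hlast
      have h1 := ih hlast hp
      rw [insertBy_cons]
      by_cases hz : p x z = true
      · rw [if_pos hz, List.getLast?_cons_cons, List.getLast?_cons_cons]; exact hlast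
      · rw [if_neg hz]
        cases he : PySem.List.insertBy p x (w :: rest) with
        | nil => exact absurd he (insertBy_ne_nil p x _)
        | cons a l =>
          rw [he] at h1
          rw [List.getLast?_cons_cons]
          exact h1

-- the last element of an ascending list bounds every element
lemma key_last_max {α : Type} (key : α → String) (zs : List α)
    (h : List.Pairwise (fun a b => key a ≤ key b) zs) (m : α)
    (hm : zs.getLast? = some m) : ∀ z ∈ zs, key z ≤ key m := by
  intro z hz
  rw [List.getLast?_eq_head?_reverse] at hm
  have hrev : List.Pairwise (fun a b => key b ≤ key a) zs.reverse :=
    List.pairwise_reverse.mpr h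
  cases hr : zs.reverse with
  | nil => rw [hr] at hm; simp at hm
  | cons a l =>
    rw [hr] at hm; simp at hm; subst hm
    rw [hr] at hrev
    have hz' : z ∈ a :: l := by rw [← hr]; exact List.mem_reverse.mpr hz
    rcases List.mem_cons.mp hz' with h1 | h2
    · subst h1; exact le_refl _
    · exact List.rel_of_pairwise_cons hrev h2

-- the linear scan equals the last element of the stable sort, paired with its date
lemma scan_eq_sorted_last (xs : List (List (String × String))) :
    xs.foldl pvScanStep none
    = ((PySem.List.sorted xs (fun e => (PySem.Dict.ofList e).getD "date" "") false).getLast?).map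
        (fun e => (e, (PySem.Dict.ofList e).getD "date" "")) := by
  have key : List (String × String) → String := fun e => (PySem.Dict.ofList e).getD "date" ""
  induction xs using List.reverseRecOn with
  | nil => simp [PySem.List.sorted]
  | append_singleton xs y ih =>
    rw [List.foldl_append, ih]
    have hsorted : PySem.List.sorted (xs ++ [y]) (fun e => (PySem.Dict.ofList e).getD "date" "") false
        = PySem.List.insertBy
            (fun a b => decide ((PySem.Dict.ofList a).getD "date" "" < (PySem.Dict.ofList b).getD "date" ""))
            y (PySem.List.sorted xs (fun e => (PySem.Dict.ofList e).getD "date" "") false) := by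
      rw [PySem.List.sorted_eq_foldl_insertBy, PySem.List.sorted_eq_foldl_insertBy, List.foldl_append]
      simp
    rw [hsorted]
    cases hlast : (PySem.List.sorted xs (fun e => (PySem.Dict.ofList e).getD "date" "") false).getLast? with
    | none =>
      rw [List.getLast?_eq_none_iff] at hlast
      rw [hlast]
      simp [PySem.List.insertBy, pvScanStep]
    | some m =>
      have hmax : ∀ z ∈ PySem.List.sorted xs (fun e => (PySem.Dict.ofList e).getD "date" "") false,
          (PySem.Dict.ofList z).getD "date" "" ≤ (PySem.Dict.ofList m).getD "date" "" :=
        key_last_max (fun e => (PySem.Dict.ofList e).getD "date" "") _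
          (PySem.List.sorted_pairwise xs _) m hlast
      simp only [List.foldl_cons, List.foldl_nil, Option.map_some]
      by_cases hle : (PySem.Dict.ofList m).getD "date" "" ≤ (PySem.Dict.ofList y).getD "date" ""
      · have hall : ∀ z ∈ PySem.List.sorted xs (fun e => (PySem.Dict.ofList e).getD "date" "") false,
            (fun a b => decide ((PySem.Dict.ofList a).getD "date" "" < (PySem.Dict.ofList b).getD "date" "")) y z = false := by
          intro z hz
          simp only [decide_eq_false_iff_not, not_lt]
          exact le_trans (hmax z hz) hle
        rw [PySem.List.insertBy_of_forall_not_before _ _ _ hall]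
        simp [pvScanStep, hle]
      · have hp : (fun a b => decide ((PySem.Dict.ofList a).getD "date" "" < (PySem.Dict.ofList b).getD "date" "")) y m = true := by
          simp only [decide_eq_true_eq]
          exact lt_of_not_ge hle
        rw [getLast?_insertBy_of_before _ _ _ _ hlast hp]
        simp [pvScanStep, hle]

-- pyGetD with index -1 is getLast
lemma pyGetD_neg_one {α : Type} (xs : List α) (d : α) (h : xs ≠ []) :
    PySem.List.pyGetD xs (-1) d = xs.getLast?.getD d := by
  have hn : 0 < xs.length := List.length_pos_iff.mpr h
  simp only [PySem.List.pyGetD, PySem.List.pyGet?, PySem.List.pyIdx?]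
  have h1 : ¬ (0 : Int) ≤ -1 := by norm_num
  have h2 : -(xs.length : Int) ≤ -1 := by omega
  rw [if_neg h1, if_pos h2]
  simp only [Option.bind_some]
  rw [List.getLast?_eq_getElem?]
  rfl

-- A's latest-quantity computation equals B's scan-based one
lemma quantity_eq (cd : List (List (String × String))) :
    get_latest_quantity cd = pvQtyOfBest (pvScanBest cd) := by
  by_cases h : cd = []
  · subst h; rfl
  · have hkey := scan_eq_sorted_last cd
    have hs : PySem.List.sorted cd (fun e => (PySem.Dict.ofList e).getD "date" "") false ≠ [] := by
      rw [Ne, PySem.List.sorted_eq_nil_iff]; exact h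
    cases hl : (PySem.List.sorted cd (fun e => (PySem.Dict.ofList e).getD "date" "") false).getLast? with
    | none =>
      rw [List.getLast?_eq_none_iff] at hl
      exact absurd hl hs
    | some m =>
      have hscan : pvScanBest cd = some (m, (PySem.Dict.ofList m).getD "date" "") := by
        rw [pvScanBest_eq_foldl, hkey, hl]
        rfl
      unfold get_latest_quantity get_latest_entry
      rw [if_neg h, pyGetD_neg_one _ _ hs, hl, hscan]
      rfl

-- building the dict by repeated insertion equals building a flat pair list and ofList-ing it
lemma fold_insert_eq_ofList (P : List (String × List (List (String × String)))) :
    ∀ (l : List (String × List (List (String × String)))),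
    P.foldl
      (fun (expanded : PySem.Dict String (List (List (String × String)))) kv =>
        let quantity := get_latest_quantity kv.2
        let expanded := expanded.insert kv.1 kv.2
        (PySem.List.pyRange 2 (quantity + 1) 1).foldl
          (fun acc i => acc.insert (kv.1 ++ " (x" ++ PySem.Int.toStr i ++ ")") kv.2) expanded)
      (PySem.Dict.ofList l)
    = PySem.Dict.ofList
        (P.foldl
          (fun pairs kv =>
            let quantity := pvQtyOfBest (pvScanBest kv.2)
            (pairs ++ [(kv.1, kv.2)]) ++
              (PySem.List.pyRange 2 (quantity + 1) 1).map
                (fun i => (kv.1 ++ " (x" ++ PySem.Int.toStr i ++ ")", kv.2)))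
          l) := by
  induction P with
  | nil => intro l; rfl
  | cons kv P ih =>
    intro l
    simp only [List.foldl_cons]
    rw [quantity_eq]
    have hstep :
        (let quantity := pvQtyOfBest (pvScanBest kv.2)
         let expanded := (PySem.Dict.ofList l).insert kv.1 kv.2
         (PySem.List.pyRange 2 (quantity + 1) 1).foldl
           (fun acc i => acc.insert (kv.1 ++ " (x" ++ PySem.Int.toStr i ++ ")") kv.2) expanded)
        = PySem.Dict.ofList
            ((l ++ [(kv.1, kv.2)]) ++
              (PySem.List.pyRange 2 (pvQtyOfBest (pvScanBest kv.2) + 1) 1).map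
                (fun i => (kv.1 ++ " (x" ++ PySem.Int.toStr i ++ ")", kv.2))) := by
      simp only [PySem.Dict.ofList, PySem.Dict.update, List.foldl_append, List.foldl_map,
        List.foldl_cons, List.foldl_nil]
    rw [hstep, ih]

-- ===== VERDICT (by name: the statement is the Claim_ definition above) =====
theorem expand_history_with_duplicates_spec : Claim_equal_expand_history_with_duplicates := by
  intro history _
  unfold Spec_expand_history_with_duplicates expand_history_with_duplicates expand_history_with_duplicates_alt
  have h := fold_insert_eq_ofList ((PySem.Dict.ofList history).items) []
  simp only [PySem.Dict.ofList] at h ⊢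
  rw [show (PySem.Dict.empty : PySem.Dict String (List (List (String × String)))) = PySem.Dict.empty.update [] from rfl]
  exact congrArg PySem.Dict.items h
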